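-- pv_equiv track=rewrite | github.com/danielsfafas/WhatsApp-IA | python-worker/calendar_availability.py | _month_num_es
-- ===== SOURCE A (Python) =====
-- _MONTHS_ES = (
--     "enero",
--     "febrero",
--     "marzo",
--     "abril",
--     "mayo",
--     "junio",
--     "julio",
--     "agosto",
--     "septiembre",
--     "octubre",
--     "noviembre",
--     "diciembre",
-- )
--
-- def _month_num_es(name: str) -> int | None:
--     n = name.strip().lower()
--     for i, m in enumerate(_MONTHS_ES, start=1):
--         if m == n:
--             return i
--     if len(n) < 3:
--         return None
--     for i, m in enumerate(_MONTHS_ES, start=1):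
--         if m.startswith(n):
--             return i
--     return None
-- ===== SOURCE B (Python) =====
-- _MONTHS_ES = (
--     "enero",
--     "febrero",
--     "marzo",
--     "abril",
--     "mayo",
--     "junio",
--     "julio",
--     "agosto",
--     "septiembre",
--     "octubre",
--     "noviembre",
--     "diciembre",
-- )
--
-- # Precompute once: every prefix (length >= 3) of every month name, and the full
-- # names, mapped to the month number; first month wins on (non-occurring) collisions.
-- _PREFIX_TO_NUM = {}
-- for _i, _m in enumerate(_MONTHS_ES, start=1):
--     for _k in range(3, len(_m) + 1):
--         _PREFIX_TO_NUM.setdefault(_m[:_k], _i)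
--
--
-- def _month_num_es(name):
--     return _PREFIX_TO_NUM.get(name.strip().lower())
-- ===== Notes on version B (the rewrite author's own statement) =====
-- stated objective: alternative
-- what changed: Replaces A's two sequential scans over the month tuple (exact match, then prefix match) with a dict of all length->=3 month-name prefixes precomputed once at module load, so each call is a single dict lookup; relies on no month name being a prefix of another.
import Mathlib
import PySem

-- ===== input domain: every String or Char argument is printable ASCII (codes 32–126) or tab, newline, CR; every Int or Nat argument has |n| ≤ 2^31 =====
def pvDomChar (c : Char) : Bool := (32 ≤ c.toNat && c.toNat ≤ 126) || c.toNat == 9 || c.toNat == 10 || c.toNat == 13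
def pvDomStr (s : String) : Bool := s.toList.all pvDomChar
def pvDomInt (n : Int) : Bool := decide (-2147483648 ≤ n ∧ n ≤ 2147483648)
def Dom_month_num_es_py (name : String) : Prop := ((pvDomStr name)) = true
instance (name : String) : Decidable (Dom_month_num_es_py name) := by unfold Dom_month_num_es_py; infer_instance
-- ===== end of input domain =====

-- B replaces A's two sequential scans over the month names with a prefix→number
-- dict built once, so each call is a single dict lookup (objective: alternative algorithm; return value identical).

-- ===== PORT A =====
def monthsEs : List String :=
  ["enero", "febrero", "marzo", "abril", "mayo", "junio",
   "julio", "agosto", "septiembre", "octubre", "noviembre", "diciembre"]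

-- first for-loop of A: exact match, return its index
def monthLoopExact : List (Int × String) → String → Option Int
  | [], _ => none
  | (i, m) :: rest, n => if m == n then some i else monthLoopExact rest n

-- second for-loop of A: first month name starting with n
def monthLoopPrefix : List (Int × String) → String → Option Int
  | [], _ => none
  | (i, m) :: rest, n =>
      if PySem.Str.startswith m n then some i else monthLoopPrefix rest n

def month_num_es_py (name : String) : Option Int :=
  let n := PySem.Str.lower (PySem.Str.strip name)
  match monthLoopExact (PySem.List.enumerate monthsEs 1) n with
  | some i => some i
  | none =>
      if PySem.Str.len n < 3 then none
      else monthLoopPrefix (PySem.List.enumerate monthsEs 1) n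

-- ===== PORT B =====
-- the module-level loop of Source B: dict of all length-≥3 prefixes of the month names
def prefixToNum : PySem.Dict String Int :=
  (PySem.List.enumerate monthsEs 1).foldl
    (fun d im =>
      (PySem.List.pyRange 3 (PySem.Str.len im.2 + 1) 1).foldl
        (fun d k => d.setdefault (PySem.Str.slice im.2 none (some k)) im.1) d)
    PySem.Dict.empty

def month_num_es_py_alt (name : String) : Option Int :=
  prefixToNum.get? (PySem.Str.lower (PySem.Str.strip name))

-- ===== PRECONDITION & SPEC =====
def Spec_month_num_es_py (name : String) (out : Option Int) : Prop := out = month_num_es_py_alt name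
instance (name : String) (out : Option Int) : Decidable (Spec_month_num_es_py name out) := by unfold Spec_month_num_es_py; infer_instance

-- ===== CLAIM (what is proved, stated in full; the proofs are below) =====
def Claim_equal_month_num_es_py : Prop := ∀ (name : String), Dom_month_num_es_py name → Spec_month_num_es_py name (month_num_es_py name)

-- ===== LEMMAS AND PROOFS =====

-- the keys of prefixToNum, as a literal (insertion order)
def keysList : List String :=
  ["ene", "ener", "enero", "feb", "febr", "febre", "febrer", "febrero", "mar", "marz", "marzo", "abr", "abri", "abril", "may", "mayo", "jun", "juni", "junio", "jul", "juli", "julio", "ago", "agos", "agost", "agosto", "sep", "sept", "septi", "septie", "septiem", "septiemb", "septiembr", "septiembre", "oct", "octu", "octub", "octubr", "octubre", "nov", "novi", "novie", "noviem", "noviemb", "noviembr", "noviembre", "dic", "dici", "dicie", "diciem", "diciemb", "diciembr", "diciembre"]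

set_option maxRecDepth 100000 in
theorem keys_prefixToNum : prefixToNum.keys = keysList := by decide

theorem loopExact_none (pairs : List (Int × String)) (n : String)
    (h : ∀ p ∈ pairs, p.2 ≠ n) : monthLoopExact pairs n = none := by
  induction pairs with
  | nil => rfl
  | cons p rest ih =>
      obtain ⟨i, m⟩ := p
      have hm : m ≠ n := h (i, m) (List.mem_cons_self ..)
      simp only [monthLoopExact, beq_iff_eq, if_neg hm]
      exact ih (fun q hq => h q (List.mem_cons_of_mem _ hq))

theorem loopPrefix_none (pairs : List (Int × String)) (n : String)
    (h : ∀ p ∈ pairs, PySem.Str.startswith p.2 n = false) :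
    monthLoopPrefix pairs n = none := by
  induction pairs with
  | nil => rfl
  | cons p rest ih =>
      obtain ⟨i, m⟩ := p
      have hm := h (i, m) (List.mem_cons_self ..)
      simp only [monthLoopPrefix, hm, Bool.false_eq_true, if_false]
      exact ih (fun q hq => h q (List.mem_cons_of_mem _ hq))

set_option maxRecDepth 100000 in
theorem months_mem_keys :
    ∀ p ∈ PySem.List.enumerate monthsEs 1, p.2 ∈ keysList := by decide

set_option maxRecDepth 100000 in
theorem prefix_mem_keys :
    ∀ p ∈ PySem.List.enumerate monthsEs 1,
      ∀ k ∈ List.range (p.2.toList.length + 1), 3 ≤ k →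
        String.ofList (p.2.toList.take k) ∈ keysList := by decide

set_option maxRecDepth 100000 in
set_option maxHeartbeats 2000000 in
theorem core_eq (n : String) :
    (match monthLoopExact (PySem.List.enumerate monthsEs 1) n with
     | some i => some i
     | none =>
         if PySem.Str.len n < 3 then none
         else monthLoopPrefix (PySem.List.enumerate monthsEs 1) n)
    = prefixToNum.get? n := by
  by_cases hmem : n ∈ keysList
  · fin_cases hmem <;> decide
  · have hB : prefixToNum.get? n = none := by
      rw [PySem.Dict.get?_eq_none_iff_contains, Bool.eq_false_iff]
      intro hc
      exact hmem (keys_prefixToNum ▸ (PySem.Dict.contains_iff_mem_keys _ _).mp hc)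
    have hA1 : monthLoopExact (PySem.List.enumerate monthsEs 1) n = none := by
      apply loopExact_none
      intro p hp heq
      exact hmem (heq ▸ months_mem_keys p hp)
    rw [hB, hA1]
    by_cases hlen : PySem.Str.len n < 3
    · rw [if_pos hlen]
    · simp only [if_neg hlen]
      apply loopPrefix_none
      intro p hp
      by_contra hsw
      have hsw' : PySem.Str.startswith p.2 n = true := by
        cases h : PySem.Str.startswith p.2 n
        · exact absurd h hsw
        · rfl
      rw [PySem.Str.startswith_eq] at hsw'
      have hpre := (PySem.Chars.startswith_iff _ _).mp hsw'
      have hlenle := hpre.length_le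
      have htake := List.prefix_iff_eq_take.mp hpre
      have hk3 : 3 ≤ n.toList.length := by
        rw [PySem.Str.len_eq] at hlen
        omega
      have hn : n = String.ofList (p.2.toList.take n.toList.length) := by
        rw [← htake, String.ofList_toList]
      have hk : n.toList.length ∈ List.range (p.2.toList.length + 1) := by
        simp only [List.mem_range]; omega
      exact hmem (hn ▸ prefix_mem_keys p hp _ hk hk3)

-- ===== VERDICT (by name: the statement is the Claim_ definition above) =====
theorem month_num_es_py_spec : Claim_equal_month_num_es_py := by
  intro name _
  unfold Spec_month_num_es_py month_num_es_py month_num_es_py_alt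
  exact core_eq (PySem.Str.lower (PySem.Str.strip name))
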